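-- pv_equiv track=rewrite | github.com/ChenYuxuanNPU/streamlit_pyecharts | func.py | generate_letter_sequence
-- ===== SOURCE A (Python) =====
-- def generate_letter_sequence(start, end):
--     """
--     生成从起始字母到结束字母的所有字母序列
--     :param start: 起始字母(长度为1-3的大写字母)
--     :param end: 结束字母(长度为1-3的大写字母)
--     :return: 按顺序排列的所有字母组合
--     """
--
--     # 将字母转换为数字表示(A=1, B=2, ..., Z=26)
--     def letter_to_number(letter):
--         return sum((ord(char) - 64) * (26 ** i) for i, char in enumerate(reversed(letter)))
--
--     # 将数字转换回字母
--     def number_to_letter(num):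
--         result = []
--         while num > 0:
--             num -= 1
--             result.append(chr((num % 26) + 65))
--             num //= 26
--         return ''.join(reversed(result)) if result else 'A'
--
--     start_num = letter_to_number(start)
--     end_num = letter_to_number(end)
--
--     # 生成序列
--     sequence = []
--     for num in range(start_num, end_num + 1):
--         sequence.append(number_to_letter(num))
--
--     return sequence
-- ===== SOURCE B (Python) =====
-- def generate_letter_sequence(start, end):
--     """
--     Spreadsheet-style letter range, generated by an odometer: convert the
--     start string once, then obtain each next string by incrementing a
--     character list in place (Z -> A with carry) instead of re-converting
--     every number from scratch.
--     """
--
--     def to_num(s):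
--         n = 0
--         for c in s:
--             n = n * 26 + (ord(c) - 64)
--         return n
--
--     def to_str(n):
--         chars = []
--         while n > 0:
--             n -= 1
--             chars.append(chr(n % 26 + 65))
--             n //= 26
--         return ''.join(reversed(chars))
--
--     count = to_num(end) - to_num(start) + 1
--     if count <= 0:
--         return []
--     cur = list(to_str(to_num(start)))
--     out = [''.join(cur)]
--     for _ in range(count - 1):
--         i = len(cur) - 1
--         while i >= 0 and cur[i] == 'Z':
--             cur[i] = 'A'
--             i -= 1
--         if i < 0:
--             cur.insert(0, 'A')
--         else:
--             cur[i] = chr(ord(cur[i]) + 1)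
--         out.append(''.join(cur))
--     return out
-- ===== Notes on version B (the rewrite author's own statement) =====
-- stated objective: faster
-- what changed: B parses the endpoints with a Horner fold and then produces each successive string by an amortized O(1) odometer (carry) increment of a character list, instead of re-converting every number from scratch with big-int divisions as A does.
-- intended difference: On degenerate inputs whose start string parses to a value <= 0 (empty or containing characters below 'A') with a nonempty range, A returns a run of duplicate 'A' strings (its number_to_letter maps every non-positive number to 'A'), while B returns the distinct bijective base-26 representations starting from '' for 0 — the faithful, non-duplicated values for this unspecified corner. — e.g. on generate_letter_sequence("", ""): A returns ["A"], B returns [""]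
import Mathlib
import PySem

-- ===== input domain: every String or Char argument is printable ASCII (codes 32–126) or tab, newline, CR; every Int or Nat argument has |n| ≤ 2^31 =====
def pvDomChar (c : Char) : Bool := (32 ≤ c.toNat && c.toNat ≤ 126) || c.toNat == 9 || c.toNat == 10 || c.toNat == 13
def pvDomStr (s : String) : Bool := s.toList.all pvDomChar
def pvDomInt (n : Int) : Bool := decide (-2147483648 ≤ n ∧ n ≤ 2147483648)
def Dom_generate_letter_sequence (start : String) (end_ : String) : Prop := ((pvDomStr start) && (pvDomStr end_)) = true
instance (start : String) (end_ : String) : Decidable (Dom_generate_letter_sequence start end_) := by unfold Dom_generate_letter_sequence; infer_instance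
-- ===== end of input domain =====

-- B produces the same range by an odometer: it converts the start value once and obtains each
-- next string by a carry increment on a character list instead of re-converting every number;
-- on degenerate inputs whose start value is ≤ 0 the two differ (stated in D_ below).

-- ===== PORT A =====
-- inner number_to_letter's while loop, on num.toNat (the loop body runs only while num > 0,
-- so for num ≤ 0 the list is empty, exactly as in Python); the first argument is fuel that is
-- always at least num, so the recursion is structural and num //= 26 is Nat division (num ≥ 0).
def ntlAux : Nat → Nat → List Char
  | 0, _ => []
  | _ + 1, 0 => []
  | fuel + 1, n + 1 => Char.ofNat (n % 26 + 65) :: ntlAux fuel (n / 26)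

def ntlRev (n : Nat) : List Char := ntlAux n n

def numberToLetter (num : Int) : String :=
  let result := ntlRev num.toNat
  if result = [] then "A" else String.ofList result.reverse

def letterToNumber (letter : String) : Int :=
  ((PySem.List.enumerate letter.toList.reverse 0).map
    (fun p => ((p.2.toNat : Int) - 64) * 26 ^ p.1.toNat)).sum

def generate_letter_sequence (start : String) (end_ : String) : List String :=
  let start_num := letterToNumber start
  let end_num := letterToNumber end_
  (PySem.List.pyRange start_num (end_num + 1) 1).foldl
    (fun sequence num => sequence ++ [numberToLetter num]) []

-- ===== PORT B =====
def toNumB (s : String) : Int :=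
  s.toList.foldl (fun n c => n * 26 + ((c.toNat : Int) - 64)) 0

-- Source B's to_str: the same while loop as A's number_to_letter (hence the shared ntlRev),
-- but with no fallback: the empty list joins to ''.
def toStrB (n : Int) : String := String.ofList (ntlRev n.toNat).reverse

-- the inner 'while i >= 0 and cur[i] == Z' scan from the right, as recursion returning the
-- rewritten list together with the carry flag ('true' = the scan ran off the front)
def inc1 : List Char → List Char × Bool
  | [] => ([], true)
  | c :: t =>
    let r := inc1 t
    if r.2 then
      if c = 'Z' then ('A' :: r.1, true)
      else (Char.ofNat (c.toNat + 1) :: r.1, false)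
    else (c :: r.1, false)

def stepOdo (cur : List Char) : List Char :=
  let r := inc1 cur
  if r.2 then 'A' :: r.1 else r.1

-- the 'for _ in range(count - 1)' loop: k more increments, emitting after each
def odo : Nat → List Char → List String
  | 0, _ => []
  | k + 1, cur =>
    let cur' := stepOdo cur
    String.ofList cur' :: odo k cur'

def generate_letter_sequence_alt (start : String) (end_ : String) : List String :=
  let count := toNumB end_ - toNumB start + 1
  if count ≤ 0 then []
  else
    let cur := (toStrB (toNumB start)).toList
    String.ofList cur :: odo (count - 1).toNat cur

-- ===== PRECONDITION & SPEC =====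
-- On inputs whose start string parses to a value ≤ 0 (empty or containing characters below 'A')
-- with a nonempty range, A returns a run of duplicate 'A' strings — an artefact of its
-- number_to_letter falling back to 'A' for every non-positive number — while B returns the
-- distinct bijective base-26 representations starting from '' for 0, the faithful values there.
def pvBase26 (s : String) : Int :=
  ∑ i ∈ Finset.range s.toList.reverse.length,
    (26 : Int) ^ i * (((s.toList.reverse.getD i 'A').toNat : Int) - 64)

def D_generate_letter_sequence (start : String) (end_ : String) : Prop :=
  pvBase26 start ≤ 0 ∧ pvBase26 start ≤ pvBase26 end_
instance (start : String) (end_ : String) : Decidable (D_generate_letter_sequence start end_) := by unfold D_generate_letter_sequence; infer_instance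

def Spec_generate_letter_sequence (start : String) (end_ : String) (out : List String) : Prop := ¬ D_generate_letter_sequence start end_ → out = generate_letter_sequence_alt start end_
instance (start : String) (end_ : String) (out : List String) : Decidable (Spec_generate_letter_sequence start end_ out) := by unfold Spec_generate_letter_sequence; infer_instance

def pvDiffWitness_generate_letter_sequence : String × String := ("", "")
def pvDiffWitnessOut_generate_letter_sequence : (List String) × (List String) := (["A"], [""])

-- ===== CLAIM (what is proved, stated in full; the proofs are below) =====
def Claim_unchanged_generate_letter_sequence : Prop := ∀ (start : String) (end_ : String), Dom_generate_letter_sequence start end_ → Spec_generate_letter_sequence start end_ (generate_letter_sequence start end_)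
def Claim_changed_generate_letter_sequence : Prop := Dom_generate_letter_sequence (pvDiffWitness_generate_letter_sequence.1) (pvDiffWitness_generate_letter_sequence.2) ∧ D_generate_letter_sequence (pvDiffWitness_generate_letter_sequence.1) (pvDiffWitness_generate_letter_sequence.2) ∧ generate_letter_sequence (pvDiffWitness_generate_letter_sequence.1) (pvDiffWitness_generate_letter_sequence.2) = pvDiffWitnessOut_generate_letter_sequence.1 ∧ generate_letter_sequence_alt (pvDiffWitness_generate_letter_sequence.1) (pvDiffWitness_generate_letter_sequence.2) = pvDiffWitnessOut_generate_letter_sequence.2 ∧ pvDiffWitnessOut_generate_letter_sequence.1 ≠ pvDiffWitnessOut_generate_letter_sequence.2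
def Claim_exact_generate_letter_sequence : Prop := ∀ (start : String) (end_ : String), Dom_generate_letter_sequence start end_ → D_generate_letter_sequence start end_ → generate_letter_sequence start end_ ≠ generate_letter_sequence_alt start end_

-- ===== LEMMAS AND PROOFS =====

theorem ntlAux_fuel (n : Nat) : ∀ f1 f2, n ≤ f1 → n ≤ f2 → ntlAux f1 n = ntlAux f2 n := by
  induction n using Nat.strong_induction_on with
  | _ n ih =>
    intro f1 f2 h1 h2
    match n, f1, f2 with
    | 0, 0, 0 => rfl
    | 0, 0, _ + 1 => rfl
    | 0, _ + 1, 0 => rfl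
    | 0, _ + 1, _ + 1 => rfl
    | m + 1, g1 + 1, g2 + 1 =>
      simp only [ntlAux]
      exact congrArg _ (ih (m / 26) (by omega) g1 g2 (by omega) (by omega))

theorem ntlRev_zero : ntlRev 0 = [] := rfl

theorem ntlRev_succ (n : Nat) : ntlRev (n + 1) = Char.ofNat (n % 26 + 65) :: ntlRev (n / 26) := by
  simp only [ntlRev, ntlAux]
  exact congrArg _ (ntlAux_fuel (n / 26) n (n / 26) (by omega) le_rfl)

theorem chVal (d : Nat) (h : d < 26) : (Char.ofNat (d + 65)).toNat = d + 65 := by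
  interval_cases d <;> decide

theorem numberToLetter_nonpos (t : Int) (h : t ≤ 0) : numberToLetter t = "A" := by
  have : t.toNat = 0 := by omega
  simp [numberToLetter, this, ntlRev_zero]

theorem numberToLetter_pos (t : Int) (h : 1 ≤ t) :
    numberToLetter t = String.ofList ((ntlRev t.toNat).reverse) ∧ ntlRev t.toNat ≠ [] := by
  obtain ⟨k, hk⟩ : ∃ k, t.toNat = k + 1 := ⟨t.toNat - 1, by omega⟩
  rw [numberToLetter, hk, ntlRev_succ]
  simp

theorem inc1_append_singleton (xs : List Char) (c : Char) :
    inc1 (xs ++ [c]) =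
      if c = 'Z' then ((inc1 xs).1 ++ ['A'], (inc1 xs).2)
      else (xs ++ [Char.ofNat (c.toNat + 1)], false) := by
  induction xs with
  | nil =>
    by_cases hc : c = 'Z' <;> simp [inc1, hc]
  | cons x t ih =>
    simp only [List.cons_append, inc1, ih]
    by_cases hc : c = 'Z' <;> by_cases hx : x = 'Z' <;>
      simp [hc, hx] <;> split_ifs <;> simp

theorem stepOdo_ntlRev (n : Nat) : stepOdo ((ntlRev n).reverse) = (ntlRev (n + 1)).reverse := by
  induction n using Nat.strong_induction_on with
  | _ n ih =>
    match n with
    | 0 => decide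
    | m + 1 =>
      rw [ntlRev_succ m, ntlRev_succ (m + 1)]
      simp only [List.reverse_cons]
      by_cases h : m % 26 = 25
      · have hz : Char.ofNat (m % 26 + 65) = 'Z' := by rw [h]
        have h1 : (m + 1) % 26 = 0 := by omega
        have h2 : (m + 1) / 26 = m / 26 + 1 := by omega
        have hA : Char.ofNat ((m + 1) % 26 + 65) = 'A' := by rw [h1]
        rw [hz, hA, h2, ← ih (m / 26) (by omega)]
        simp only [stepOdo, inc1_append_singleton]
        split_ifs <;> simp
      · have hnz : Char.ofNat (m % 26 + 65) ≠ 'Z' := by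
          intro hc
          have hv := chVal (m % 26) (by omega)
          rw [hc] at hv
          simp at hv
          omega
        have h1 : (m + 1) % 26 = m % 26 + 1 := by omega
        have h2 : (m + 1) / 26 = m / 26 := by omega
        rw [h1, h2]
        simp only [stepOdo, inc1_append_singleton, if_neg hnz, chVal (m % 26) (by omega)]
        simp

theorem odo_spec (k : Nat) : ∀ n : Nat,
    odo k ((ntlRev n).reverse)
      = (List.range k).map (fun i => String.ofList ((ntlRev (n + 1 + i)).reverse)) := by
  induction k with
  | zero => intro n; rfl
  | succ k ih =>
    intro n
    simp only [odo, stepOdo_ntlRev n, ih (n + 1), List.range_succ_eq_map, List.map_cons,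
      List.map_map, List.cons.injEq]
    refine ⟨by simp, ?_⟩
    apply List.map_congr_left
    intro i _
    simp only [Function.comp_apply]
    have hx : n + 1 + 1 + i = n + 1 + (i + 1) := by omega
    rw [Nat.succ_eq_add_one, hx]

-- the common value of letter_to_number / to_num, little-endian over the reversed letters
def valLE : List Char → Int
  | [] => 0
  | c :: t => ((c.toNat : Int) - 64) + 26 * valLE t

theorem enum_sum (xs : List Char) : ∀ s : Nat,
    ((PySem.List.enumerate xs (s : Int)).map
      (fun p => ((p.2.toNat : Int) - 64) * 26 ^ p.1.toNat)).sum = 26 ^ s * valLE xs := by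
  induction xs with
  | nil => intro s; simp [PySem.List.enumerate_nil, valLE]
  | cons c t ih =>
    intro s
    have hcast : ((s : Int) + 1) = ((s + 1 : Nat) : Int) := by push_cast; ring
    rw [PySem.List.enumerate_cons, List.map_cons, List.sum_cons, hcast, ih (s + 1)]
    simp only [valLE, Int.toNat_natCast]
    ring

theorem valLE_append_singleton (ys : List Char) (c : Char) :
    valLE (ys ++ [c]) = valLE ys + ((c.toNat : Int) - 64) * 26 ^ ys.length := by
  induction ys with
  | nil => simp [valLE]
  | cons y t ih => simp [valLE, ih]; ring

theorem horner (xs : List Char) : ∀ acc : Int,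
    xs.foldl (fun n c => n * 26 + ((c.toNat : Int) - 64)) acc
      = acc * 26 ^ xs.length + valLE xs.reverse := by
  induction xs with
  | nil => intro acc; simp [valLE]
  | cons c t ih =>
    intro acc
    rw [List.foldl_cons, ih, List.reverse_cons, valLE_append_singleton]
    simp [List.length_reverse]
    ring

theorem letterToNumber_eq_valLE (s : String) : letterToNumber s = valLE s.toList.reverse := by
  have h := enum_sum s.toList.reverse 0
  simp only [Nat.cast_zero, pow_zero, one_mul] at h
  exact h

theorem toNumB_eq (s : String) : toNumB s = letterToNumber s := by
  rw [toNumB, letterToNumber_eq_valLE, horner]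
  ring

theorem sumVal (l : List Char) :
    ∑ i ∈ Finset.range l.length, (26 : Int) ^ i * (((l.getD i 'A').toNat : Int) - 64)
      = valLE l := by
  induction l with
  | nil => simp [valLE]
  | cons c t ih =>
    rw [List.length_cons, Finset.sum_range_succ']
    simp only [List.getD_cons_succ, List.getD_cons_zero, pow_zero, one_mul, pow_succ]
    rw [valLE, ← ih, Finset.mul_sum, add_comm]
    congr 1
    apply Finset.sum_congr rfl
    intro i _
    ring

theorem pvBase26_eq (s : String) : pvBase26 s = toNumB s := by
  rw [pvBase26, List.length_reverse, toNumB_eq, letterToNumber_eq_valLE, ← sumVal s.toList.reverse]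
  rw [List.length_reverse]

theorem tail_eq (t e : Int) (h1 : 1 ≤ t) (h2 : t ≤ e) :
    (PySem.List.pyRange t (e + 1) 1).map numberToLetter
      = String.ofList ((numberToLetter t).toList)
          :: odo (e - t).toNat ((numberToLetter t).toList) := by
  obtain ⟨n, hn⟩ : ∃ n : Nat, t = (n : Int) + 1 := ⟨(t - 1).toNat, by omega⟩
  have htn : t.toNat = n + 1 := by omega
  have hcur : (numberToLetter t).toList = (ntlRev (n + 1)).reverse := by
    rw [(numberToLetter_pos t h1).1, String.toList_ofList, htn]
  rw [hcur, hn]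
  have hK : (e + 1 - ((n : Int) + 1)).toNat = (e - ((n : Int) + 1)).toNat + 1 := by omega
  rw [PySem.List.pyRange_one, hK, List.map_map, List.range_succ_eq_map, List.map_cons,
    List.map_map, odo_spec, List.cons.injEq]
  have hx0 : ((n : Int) + 1).toNat = n + 1 := by omega
  constructor
  · simp only [Function.comp_apply, Nat.cast_zero, add_zero]
    rw [(numberToLetter_pos ((n : Int) + 1) (by omega)).1, hx0]
  · apply List.map_congr_left
    intro i _
    simp only [Function.comp_apply, Nat.succ_eq_add_one, Nat.cast_add, Nat.cast_one]
    have hxi : ((n : Int) + 1 + ((i : Nat) + 1 : Int)).toNat = n + 1 + 1 + i := by omega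
    rw [(numberToLetter_pos ((n : Int) + 1 + ((i : Nat) + 1 : Int)) (by omega)).1, hxi]

-- ===== VERDICT (by name: the statements are the Claim_ definitions above) =====
theorem generate_letter_sequence_spec : Claim_unchanged_generate_letter_sequence := by
  intro start end_ _ hnD
  unfold D_generate_letter_sequence at hnD
  rw [pvBase26_eq, pvBase26_eq] at hnD
  simp only [generate_letter_sequence, generate_letter_sequence_alt, toNumB_eq,
    PySem.List.foldl_append_singleton_eq_map, List.nil_append]
  rw [← toNumB_eq start, ← toNumB_eq end_] at *
  set s := toNumB start with hs
  set e := toNumB end_ with he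
  by_cases h1 : e - s + 1 ≤ 0
  · rw [if_pos h1, PySem.List.pyRange_one_eq_nil (by omega), List.map_nil]
  · rw [if_neg h1]
    have hse : s ≤ e := by omega
    have hpos : 1 ≤ s := by omega
    have hcur : (toStrB s).toList = (numberToLetter s).toList := by
      rw [toStrB, (numberToLetter_pos s hpos).1]
    have hcnt : (e - s + 1 - 1).toNat = (e - s).toNat := by omega
    rw [hcur, hcnt]
    exact tail_eq s e hpos hse

theorem generate_letter_sequence_changed : Claim_changed_generate_letter_sequence := by
  unfold Claim_changed_generate_letter_sequence; decide

theorem generate_letter_sequence_tight : Claim_exact_generate_letter_sequence := by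
  intro start end_ _ hD
  obtain ⟨h0, hle⟩ := hD
  rw [pvBase26_eq] at h0 hle
  rw [pvBase26_eq] at hle
  simp only [generate_letter_sequence, generate_letter_sequence_alt, toNumB_eq,
    PySem.List.foldl_append_singleton_eq_map, List.nil_append]
  rw [← toNumB_eq start, ← toNumB_eq end_]
  set s := toNumB start with hs
  set e := toNumB end_ with he
  have hK : (e + 1 - s).toNat = (e - s).toNat + 1 := by omega
  rw [PySem.List.pyRange_one, hK, List.range_succ_eq_map, List.map_cons, List.map_cons,
    if_neg (by omega : ¬ e - s + 1 ≤ 0)]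
  have hA : numberToLetter (s + ((0 : Nat) : Int)) = "A" :=
    numberToLetter_nonpos _ (by omega)
  have hB : (toStrB s).toList = [] := by
    have : s.toNat = 0 := by omega
    rw [toStrB, this, ntlRev_zero]
    simp
  rw [hA, hB]
  intro hcontr
  have := List.head_eq_of_cons_eq hcontr
  simp at this
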